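-- pv_equiv track=rewrite | github.com/AussieSeaweed/index-librorum-prohibitorum | dmoj/coci18c2p2/main.py | solve
-- ===== SOURCE A (Python) =====
-- def solve(N, L, R, U, D):
--     blocks = []
--
--     for i, (l, r, u, d) in enumerate(zip(L, R, U, D)):
--         if (l == -1) ^ (r == -1):
--             return False
--         if (u == -1) ^ (d == -1):
--             return False
--         if l != -1 and l + r >= N:
--             return False
--         if u != -1 and u + d >= N:
--             return False
--
--         if l != -1:
--             blocks.append((i, l))
--             blocks.append((i, N - 1 - r))
--         if u != -1:
--             blocks.append((u, i))
--             blocks.append((N - 1 - d, i))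
--
--     for r, c in blocks:
--         if L[r] == -1 or c < L[r] or c > N - 1 - R[r]:
--             return False
--         if U[c] == -1 or r < U[c] or r > N - 1 - D[c]:
--             return False
--
--     return True
-- ===== SOURCE B (Python) =====
-- def _span_bad(N, A, B, c, lo, hi):
--     return A[c] == -1 or lo < A[c] or hi > N - 1 - B[c]
--
--
-- def solve(N, L, R, U, D):
--     rows = list(zip(L, R, U, D))
--     for l, r, u, d in rows:
--         if (l == -1) != (r == -1) or (u == -1) != (d == -1) \
--                 or (l != -1 and l + r >= N) or (u != -1 and u + d >= N):
--             return False
--     # Aggregate: for every referenced column (resp. row), record only the min and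
--     # max row (resp. column) index that references it; one interval-containment
--     # check per distinct referenced line then replaces A's per-cell checks.
--     cspan, rspan = {}, {}
--     for i, (l, r, u, d) in enumerate(rows):
--         if l != -1:
--             for c in (l, N - 1 - r):
--                 lo, hi = cspan.get(c, (i, i))
--                 cspan[c] = (min(lo, i), max(hi, i))
--         if u != -1:
--             for rr in (u, N - 1 - d):
--                 lo, hi = rspan.get(rr, (i, i))
--                 rspan[rr] = (min(lo, i), max(hi, i))
--     for c, (lo, hi) in cspan.items():
--         if _span_bad(N, U, D, c, lo, hi):
--             return False
--     for rr, (lo, hi) in rspan.items():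
--         if _span_bad(N, L, R, rr, lo, hi):
--             return False
--     return True
-- ===== Notes on version B (the rewrite author's own statement) =====
-- stated objective: alternative
-- what changed: B replaces A's materialized per-cell `blocks` worklist and its per-cell replay loop by an aggregation: one pass folds every reference into two dicts holding, per referenced column (resp. row), only the min and max referencing index, and then does a single interval-containment check per distinct referenced line instead of A's check per cell.
-- outside the precondition, e.g. on solve(6, [-1, 0], [-1, 2], [0, -1, 5], [3, -1, -1]): A returns False, B raises IndexError; on solve(2, [0, 0], [0, 0], [-1, 5], [-1, -5]): A returns False, B returns False
import Mathlib
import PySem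

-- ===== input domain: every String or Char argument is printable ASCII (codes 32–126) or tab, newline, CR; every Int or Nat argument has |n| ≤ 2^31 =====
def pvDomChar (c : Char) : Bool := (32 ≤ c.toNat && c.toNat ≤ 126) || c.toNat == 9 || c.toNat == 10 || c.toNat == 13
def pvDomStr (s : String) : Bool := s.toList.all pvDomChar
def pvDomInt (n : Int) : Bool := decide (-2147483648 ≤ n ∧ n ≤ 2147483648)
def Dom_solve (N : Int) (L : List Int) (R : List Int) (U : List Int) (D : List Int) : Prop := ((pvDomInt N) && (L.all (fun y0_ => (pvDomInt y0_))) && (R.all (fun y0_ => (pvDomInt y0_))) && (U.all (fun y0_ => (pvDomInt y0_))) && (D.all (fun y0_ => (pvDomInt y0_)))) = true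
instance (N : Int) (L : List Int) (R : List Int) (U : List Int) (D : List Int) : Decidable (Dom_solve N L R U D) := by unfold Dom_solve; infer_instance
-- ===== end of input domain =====

-- B replaces A's per-cell `blocks` worklist and replay loop with min/max span dicts:
-- one interval-containment check per distinct referenced line.  Objective: alternative.

-- ===== PORT A =====
-- zip(L, R, U, D) (shared by both ports; both Pythons zip the four lists)
def pvZip4 : List Int → List Int → List Int → List Int → List (Int × Int × Int × Int)
  | a :: as, b :: bs, c :: cs, d :: ds => (a, b, c, d) :: pvZip4 as bs cs ds
  | _, _, _, _ => []

-- body of A's second loop for one block (r, c); `true` = no early `return False`.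
-- (pyGet? …).getD 0: where Python raises IndexError (excluded by Pre_solve) the
-- port reads a default instead.
def solveCell (N : Int) (L R U D : List Int) (r c : Int) : Bool :=
  let lr := (PySem.List.pyGet? L r).getD 0
  let rr := (PySem.List.pyGet? R r).getD 0
  let uc := (PySem.List.pyGet? U c).getD 0
  let dc := (PySem.List.pyGet? D c).getD 0
  if lr = -1 ∨ c < lr ∨ c > N - 1 - rr then false
  else if uc = -1 ∨ r < uc ∨ r > N - 1 - dc then false
  else true

-- A's second loop over blocks
def solveLoop2 (N : Int) (L R U D : List Int) : List (Int × Int) → Bool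
  | [] => true
  | (r, c) :: rest => if solveCell N L R U D r c then solveLoop2 N L R U D rest else false

-- A's first loop: builds blocks; none = an early `return False`
def solveLoop1 (N : Int) : List (Int × (Int × Int × Int × Int)) → List (Int × Int) → Option (List (Int × Int))
  | [], blocks => some blocks
  | (i, (l, r, u, d)) :: rest, blocks =>
    if (l = -1 ∧ r ≠ -1) ∨ (l ≠ -1 ∧ r = -1) then none       -- (l == -1) ^ (r == -1)
    else if (u = -1 ∧ d ≠ -1) ∨ (u ≠ -1 ∧ d = -1) then none  -- (u == -1) ^ (d == -1)
    else if l ≠ -1 ∧ l + r ≥ N then none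
    else if u ≠ -1 ∧ u + d ≥ N then none
    else
      let blocks := blocks ++ (if l ≠ -1 then [(i, l), (i, N - 1 - r)] else [])
      let blocks := blocks ++ (if u ≠ -1 then [(u, i), (N - 1 - d, i)] else [])
      solveLoop1 N rest blocks

def solve (N : Int) (L : List Int) (R : List Int) (U : List Int) (D : List Int) : Bool :=
  match solveLoop1 N (PySem.List.enumerate (pvZip4 L R U D) 0) [] with
  | none => false
  | some blocks => solveLoop2 N L R U D blocks

-- ===== PORT B =====
-- B's first loop (validation only, single merged condition)
def solveAltPass1 (N : Int) : List (Int × Int × Int × Int) → Bool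
  | [] => true
  | (l, r, u, d) :: rest =>
    if (¬((l = -1) ↔ (r = -1))) ∨ (¬((u = -1) ↔ (d = -1))) ∨ (l ≠ -1 ∧ l + r ≥ N) ∨ (u ≠ -1 ∧ u + d ≥ N)
    then false else solveAltPass1 N rest

-- lo, hi = span.get(c, (i, i)); span[c] = (min(lo, i), max(hi, i))
def pvSpanAdd (d : PySem.Dict Int (Int × Int)) (c i : Int) : PySem.Dict Int (Int × Int) :=
  let p := (d.get? c).getD (i, i)
  d.insert c (min p.1 i, max p.2 i)

-- B's second loop: folds every reference into the two span dicts
def solveAltBuild (N : Int) : List (Int × (Int × Int × Int × Int)) →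
    PySem.Dict Int (Int × Int) → PySem.Dict Int (Int × Int) →
    PySem.Dict Int (Int × Int) × PySem.Dict Int (Int × Int)
  | [], cs, rs => (cs, rs)
  | (i, (l, r, u, d)) :: rest, cs, rs =>
    let cs := if l ≠ -1 then pvSpanAdd (pvSpanAdd cs l i) (N - 1 - r) i else cs
    let rs := if u ≠ -1 then pvSpanAdd (pvSpanAdd rs u i) (N - 1 - d) i else rs
    solveAltBuild N rest cs rs

-- _span_bad over the items of one span dict; `true` = no early `return False`
def checkSpan (N : Int) (A B : List Int) : List (Int × (Int × Int)) → Bool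
  | [] => true
  | (c, lohi) :: rest =>
    let a := (PySem.List.pyGet? A c).getD 0
    let b := (PySem.List.pyGet? B c).getD 0
    if a = -1 ∨ lohi.1 < a ∨ lohi.2 > N - 1 - b then false else checkSpan N A B rest

def solve_alt (N : Int) (L : List Int) (R : List Int) (U : List Int) (D : List Int) : Bool :=
  let rows := pvZip4 L R U D
  if solveAltPass1 N rows then
    let spans := solveAltBuild N (PySem.List.enumerate rows 0) PySem.Dict.empty PySem.Dict.empty
    if checkSpan N U D spans.1.items then checkSpan N L R spans.2.items else false
  else false

-- ===== PRECONDITION & SPEC =====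
-- Pre_solve excludes the inputs on which A's second loop indexes one of the lists out of
-- range and raises IndexError.  It is stated per row, conservatively: it also excludes a
-- few inputs on which A still returns False because an earlier pass-2 check fails (by
-- short-circuit) before the out-of-range index is ever touched — see claim.json cites.
def Pre_solve (N : Int) (L : List Int) (R : List Int) (U : List Int) (D : List Int) : Prop :=
  (∀ k : Nat, k < min (min L.length R.length) (min U.length D.length) →
     ((L.getD k 0 = -1) ↔ (R.getD k 0 = -1)) ∧ ((U.getD k 0 = -1) ↔ (D.getD k 0 = -1)) ∧
     (L.getD k 0 ≠ -1 → L.getD k 0 + R.getD k 0 < N) ∧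
     (U.getD k 0 ≠ -1 → U.getD k 0 + D.getD k 0 < N)) →
  (∀ k : Nat, k < min (min L.length R.length) (min U.length D.length) →
     (L.getD k 0 ≠ -1 →
        PySem.Raise.InRange U.length (L.getD k 0) ∧ PySem.Raise.InRange D.length (L.getD k 0) ∧
        PySem.Raise.InRange U.length (N - 1 - R.getD k 0) ∧ PySem.Raise.InRange D.length (N - 1 - R.getD k 0)) ∧
     (U.getD k 0 ≠ -1 →
        PySem.Raise.InRange L.length (U.getD k 0) ∧ PySem.Raise.InRange R.length (U.getD k 0) ∧
        PySem.Raise.InRange L.length (N - 1 - D.getD k 0) ∧ PySem.Raise.InRange R.length (N - 1 - D.getD k 0)))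
instance (N : Int) (L : List Int) (R : List Int) (U : List Int) (D : List Int) : Decidable (Pre_solve N L R U D) := by unfold Pre_solve; infer_instance

def pvWitness_solve : Int × List Int × List Int × List Int × List Int := (2, [0, 0], [0, 0], [0, 0], [0, 0])

def Spec_solve (N : Int) (L : List Int) (R : List Int) (U : List Int) (D : List Int) (out : Bool) : Prop := out = solve_alt N L R U D
instance (N : Int) (L : List Int) (R : List Int) (U : List Int) (D : List Int) (out : Bool) : Decidable (Spec_solve N L R U D out) := by unfold Spec_solve; infer_instance

-- ===== CLAIM (what is proved, stated in full; the proofs are below) =====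
def Claim_equal_solve : Prop := ∀ (N : Int) (L : List Int) (R : List Int) (U : List Int) (D : List Int), Dom_solve N L R U D → Pre_solve N L R U D → Spec_solve N L R U D (solve N L R U D)

-- ===== LEMMAS AND PROOFS =====

-- the blocks A's first loop appends for the rows starting at index s
def blocksOf (N : Int) : Int → List (Int × Int × Int × Int) → List (Int × Int)
  | _, [] => []
  | s, (l, r, u, d) :: rest =>
    ((if l ≠ -1 then [(s, l), (s, N - 1 - r)] else []) ++
     (if u ≠ -1 then [(u, s), (N - 1 - d, s)] else [])) ++ blocksOf N (s + 1) rest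

-- the (key, index) reference pairs the rows starting at index s contribute to the
-- column-span dict (refsL) and to the row-span dict (refsU)
def refsL (N : Int) : Int → List (Int × Int × Int × Int) → List (Int × Int)
  | _, [] => []
  | s, (l, r, _, _) :: rest =>
    (if l ≠ -1 then [(l, s), (N - 1 - r, s)] else []) ++ refsL N (s + 1) rest

def refsU (N : Int) : Int → List (Int × Int × Int × Int) → List (Int × Int)
  | _, [] => []
  | s, (_, _, u, d) :: rest =>
    (if u ≠ -1 then [(u, s), (N - 1 - d, s)] else []) ++ refsU N (s + 1) rest

-- the residual per-reference check (A's cross check with the self part stripped)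
def pvOk (N : Int) (A B : List Int) (i c : Int) : Bool :=
  let a := (PySem.List.pyGet? A c).getD 0
  let b := (PySem.List.pyGet? B c).getD 0
  decide (a ≠ -1 ∧ a ≤ i ∧ i ≤ N - 1 - b)

-- span-dict invariant: d maps each referenced key of P to the min and max index
-- referencing it
def spanInv (P : List (Int × Int)) (d : PySem.Dict Int (Int × Int)) : Prop :=
  d.keys.Nodup ∧
  (∀ c i, (c, i) ∈ P → d.contains c = true) ∧
  (∀ c lo hi, d.get? c = some (lo, hi) →
     (c, lo) ∈ P ∧ (c, hi) ∈ P ∧ ∀ i, (c, i) ∈ P → lo ≤ i ∧ i ≤ hi)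

theorem solveLoop1_eq (N : Int) (rows : List (Int × Int × Int × Int)) :
    ∀ (s : Int) (acc : List (Int × Int)),
    solveLoop1 N (PySem.List.enumerate rows s) acc =
      if solveAltPass1 N rows then some (acc ++ blocksOf N s rows) else none := by
  induction rows with
  | nil => intro s acc; simp [PySem.List.enumerate_nil, solveLoop1, solveAltPass1, blocksOf]
  | cons row rest ih =>
    intro s acc
    obtain ⟨l, r, u, d⟩ := row
    rw [PySem.List.enumerate_cons]
    by_cases h1 : (l = -1 ∧ r ≠ -1) ∨ (l ≠ -1 ∧ r = -1)
    · simp only [solveLoop1, solveAltPass1, if_pos h1,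
        if_pos (by tauto : (¬((l = -1) ↔ (r = -1))) ∨ (¬((u = -1) ↔ (d = -1))) ∨ (l ≠ -1 ∧ l + r ≥ N) ∨ (u ≠ -1 ∧ u + d ≥ N)),
        Bool.false_eq_true, if_false]
    · by_cases h2 : (u = -1 ∧ d ≠ -1) ∨ (u ≠ -1 ∧ d = -1)
      · simp only [solveLoop1, solveAltPass1, if_neg h1, if_pos h2,
          if_pos (by tauto : (¬((l = -1) ↔ (r = -1))) ∨ (¬((u = -1) ↔ (d = -1))) ∨ (l ≠ -1 ∧ l + r ≥ N) ∨ (u ≠ -1 ∧ u + d ≥ N)),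
          Bool.false_eq_true, if_false]
      · by_cases h3 : l ≠ -1 ∧ l + r ≥ N
        · simp only [solveLoop1, solveAltPass1, if_neg h1, if_neg h2, if_pos h3,
            if_pos (by tauto : (¬((l = -1) ↔ (r = -1))) ∨ (¬((u = -1) ↔ (d = -1))) ∨ (l ≠ -1 ∧ l + r ≥ N) ∨ (u ≠ -1 ∧ u + d ≥ N)),
            Bool.false_eq_true, if_false]
        · by_cases h4 : u ≠ -1 ∧ u + d ≥ N
          · simp only [solveLoop1, solveAltPass1, if_neg h1, if_neg h2, if_neg h3, if_pos h4,
              if_pos (by tauto : (¬((l = -1) ↔ (r = -1))) ∨ (¬((u = -1) ↔ (d = -1))) ∨ (l ≠ -1 ∧ l + r ≥ N) ∨ (u ≠ -1 ∧ u + d ≥ N)),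
              Bool.false_eq_true, if_false]
          · have hbig : ¬((¬((l = -1) ↔ (r = -1))) ∨ (¬((u = -1) ↔ (d = -1))) ∨ (l ≠ -1 ∧ l + r ≥ N) ∨ (u ≠ -1 ∧ u + d ≥ N)) := by tauto
            simp only [solveLoop1, solveAltPass1, if_neg h1, if_neg h2, if_neg h3, if_neg h4, if_neg hbig, blocksOf]
            rw [ih]
            simp [List.append_assoc]

theorem solveLoop2_append (N : Int) (L R U D : List Int) (xs ys : List (Int × Int)) :
    solveLoop2 N L R U D (xs ++ ys) = (solveLoop2 N L R U D xs && solveLoop2 N L R U D ys) := by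
  induction xs with
  | nil => simp [solveLoop2]
  | cons p rest ih =>
    obtain ⟨r, c⟩ := p
    by_cases h : solveCell N L R U D r c = true <;> simp [solveLoop2, h, ih]

theorem solveLoop2_pair (N : Int) (L R U D : List Int) (p q : Int × Int) :
    solveLoop2 N L R U D [p, q] = (solveCell N L R U D p.1 p.2 && solveCell N L R U D q.1 q.2) := by
  obtain ⟨a, b⟩ := p; obtain ⟨c, d⟩ := q
  by_cases h : solveCell N L R U D a b = true <;> simp [solveLoop2, h]

-- A's check of a row cell (i, l) or (i, N-1-r): its row part is implied by pass 1,
-- what is left is exactly pvOk against the columns.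
theorem solveCell_row (N : Int) (L R U D : List Int) (i c l r : Int)
    (hL : (PySem.List.pyGet? L i).getD 0 = l) (hR : (PySem.List.pyGet? R i).getD 0 = r)
    (hl : l ≠ -1) (hlr : l + r < N) (hc : l ≤ c ∧ c ≤ N - 1 - r) :
    solveCell N L R U D i c = pvOk N U D i c := by
  simp only [solveCell, pvOk, hL, hR]
  rw [if_neg (by push_neg; exact ⟨hl, hc.1, hc.2⟩ :
        ¬(l = -1 ∨ c < l ∨ c > N - 1 - r))]
  by_cases h2 : (PySem.List.pyGet? U c).getD 0 = -1 ∨ i < (PySem.List.pyGet? U c).getD 0 ∨ i > N - 1 - (PySem.List.pyGet? D c).getD 0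
  · rw [if_pos h2]
    symm
    simp only [decide_eq_false_iff_not]
    omega
  · rw [if_neg h2]
    symm
    simp only [decide_eq_true_eq]
    push_neg at h2
    exact ⟨h2.1, h2.2.1, h2.2.2⟩

-- A's check of a column cell (u, i) or (N-1-d, i): its column part is implied by
-- pass 1, what is left is exactly pvOk against the rows.
theorem solveCell_col (N : Int) (L R U D : List Int) (i r u d : Int)
    (hU : (PySem.List.pyGet? U i).getD 0 = u) (hD : (PySem.List.pyGet? D i).getD 0 = d)
    (hu : u ≠ -1) (hud : u + d < N) (hr : u ≤ r ∧ r ≤ N - 1 - d) :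
    solveCell N L R U D r i = pvOk N L R i r := by
  simp only [solveCell, pvOk, hU, hD]
  by_cases h1 : (PySem.List.pyGet? L r).getD 0 = -1 ∨ i < (PySem.List.pyGet? L r).getD 0 ∨ i > N - 1 - (PySem.List.pyGet? R r).getD 0
  · rw [if_pos h1]
    symm
    simp only [decide_eq_false_iff_not]
    omega
  · rw [if_neg h1]
    rw [if_neg (by push_neg; exact ⟨hu, hr.1, hr.2⟩ : ¬(u = -1 ∨ r < u ∨ r > N - 1 - d))]
    symm
    simp only [decide_eq_true_eq]
    push_neg at h1
    exact ⟨h1.1, h1.2.1, h1.2.2⟩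

-- one row's blocks, checked by A's loop = the per-reference residual checks
theorem head_all (N : Int) (L R U D : List Int) (i l r u d : Int)
    (hgL : (PySem.List.pyGet? L i).getD 0 = l) (hgR : (PySem.List.pyGet? R i).getD 0 = r)
    (hgU : (PySem.List.pyGet? U i).getD 0 = u) (hgD : (PySem.List.pyGet? D i).getD 0 = d)
    (hlrN : l ≠ -1 → l + r < N) (hudN : u ≠ -1 → u + d < N) :
    solveLoop2 N L R U D ((if l ≠ -1 then [(i, l), (i, N - 1 - r)] else []) ++
                          (if u ≠ -1 then [(u, i), (N - 1 - d, i)] else []))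
    = (((if l ≠ -1 then [(l, i), (N - 1 - r, i)] else []).all fun p => pvOk N U D p.2 p.1) &&
       ((if u ≠ -1 then [(u, i), (N - 1 - d, i)] else []).all fun p => pvOk N L R p.2 p.1)) := by
  rw [solveLoop2_append]
  have hcl : l ≠ -1 →
      (solveLoop2 N L R U D [(i, l), (i, N - 1 - r)]
        = ([(l, i), (N - 1 - r, i)].all fun p => pvOk N U D p.2 p.1)) := by
    intro hl
    have hNl := hlrN hl
    rw [solveLoop2_pair,
        solveCell_row N L R U D i l l r hgL hgR hl hNl (by omega),
        solveCell_row N L R U D i (N - 1 - r) l r hgL hgR hl hNl (by omega)]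
    simp
  have hcu : u ≠ -1 →
      (solveLoop2 N L R U D [(u, i), (N - 1 - d, i)]
        = ([(u, i), (N - 1 - d, i)].all fun p => pvOk N L R p.2 p.1)) := by
    intro hu
    have hNu := hudN hu
    rw [solveLoop2_pair,
        solveCell_col N L R U D i u u d hgU hgD hu hNu (by omega),
        solveCell_col N L R U D i (N - 1 - d) u d hgU hgD hu hNu (by omega)]
    simp
  by_cases hl : l ≠ -1 <;> by_cases hu : u ≠ -1
  · simp [hl, hu, hcl hl, hcu hu]
  · simp [hl, hu, hcl hl, solveLoop2]
  · simp [hl, hu, hcu hu, solveLoop2]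
  · simp [hl, hu, solveLoop2]

-- A's second pass = the conjunction of all residual reference checks
theorem pass2_all (N : Int) (L R U D : List Int) :
    ∀ (L' R' U' D' PL PR PU PD : List Int),
    PL.length = PR.length → PL.length = PU.length → PL.length = PD.length →
    L = PL ++ L' → R = PR ++ R' → U = PU ++ U' → D = PD ++ D' →
    solveAltPass1 N (pvZip4 L' R' U' D') = true →
    solveLoop2 N L R U D (blocksOf N (PL.length : Int) (pvZip4 L' R' U' D')) =
      (((refsL N (PL.length : Int) (pvZip4 L' R' U' D')).all fun p => pvOk N U D p.2 p.1) &&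
       ((refsU N (PL.length : Int) (pvZip4 L' R' U' D')).all fun p => pvOk N L R p.2 p.1)) := by
  intro L'
  induction L' with
  | nil =>
    intro R' U' D' PL PR PU PD _ _ _ _ _ _ _ _
    simp [pvZip4, blocksOf, refsL, refsU, solveLoop2]
  | cons l Ls ih =>
    intro R' U' D' PL PR PU PD e1 e2 e3 hL hR hU hD hpass
    rcases R' with _ | ⟨r, Rs⟩
    · simp [pvZip4, blocksOf, refsL, refsU, solveLoop2]
    rcases U' with _ | ⟨u, Us⟩
    · simp [pvZip4, blocksOf, refsL, refsU, solveLoop2]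
    rcases D' with _ | ⟨d, Ds⟩
    · simp [pvZip4, blocksOf, refsL, refsU, solveLoop2]
    have hzip : pvZip4 (l :: Ls) (r :: Rs) (u :: Us) (d :: Ds) = (l, r, u, d) :: pvZip4 Ls Rs Us Ds := rfl
    have hpass' : solveAltPass1 N (pvZip4 Ls Rs Us Ds) = true ∧
        ¬((¬((l = -1) ↔ (r = -1))) ∨ (¬((u = -1) ↔ (d = -1))) ∨ (l ≠ -1 ∧ l + r ≥ N) ∨ (u ≠ -1 ∧ u + d ≥ N)) := by
      by_cases hb : (¬((l = -1) ↔ (r = -1))) ∨ (¬((u = -1) ↔ (d = -1))) ∨ (l ≠ -1 ∧ l + r ≥ N) ∨ (u ≠ -1 ∧ u + d ≥ N)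
      · rw [hzip, solveAltPass1, if_pos hb] at hpass; exact absurd hpass (by simp)
      · rw [hzip, solveAltPass1, if_neg hb] at hpass; exact ⟨hpass, hb⟩
    obtain ⟨hrest, hhead⟩ := hpass'
    push_neg at hhead
    obtain ⟨hlr, hud, hlrN, hudN⟩ := hhead
    have hgL : (PySem.List.pyGet? L (PL.length : Int)).getD 0 = l := by
      rw [hL, PySem.List.pyGet?_natCast, List.getElem?_append_right (le_refl _)]; simp
    have hgR : (PySem.List.pyGet? R (PL.length : Int)).getD 0 = r := by
      rw [hR, e1, PySem.List.pyGet?_natCast, List.getElem?_append_right (le_refl _)]; simp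
    have hgU : (PySem.List.pyGet? U (PL.length : Int)).getD 0 = u := by
      rw [hU, e2, PySem.List.pyGet?_natCast, List.getElem?_append_right (le_refl _)]; simp
    have hgD : (PySem.List.pyGet? D (PL.length : Int)).getD 0 = d := by
      rw [hD, e3, PySem.List.pyGet?_natCast, List.getElem?_append_right (le_refl _)]; simp
    rw [hzip]
    show solveLoop2 N L R U D (((if l ≠ -1 then [((PL.length : Int), l), ((PL.length : Int), N - 1 - r)] else []) ++
      (if u ≠ -1 then [(u, (PL.length : Int)), (N - 1 - d, (PL.length : Int))] else [])) ++ blocksOf N ((PL.length : Int) + 1) (pvZip4 Ls Rs Us Ds)) = _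
    rw [solveLoop2_append,
        head_all N L R U D (PL.length : Int) l r u d hgL hgR hgU hgD
          (fun h => by have := hlrN h; omega) (fun h => by have := hudN h; omega)]
    have ihh := ih Rs Us Ds (PL ++ [l]) (PR ++ [r]) (PU ++ [u]) (PD ++ [d])
      (by simp [e1]) (by simp [e2]) (by simp [e3])
      (by rw [hL]; simp) (by rw [hR]; simp) (by rw [hU]; simp) (by rw [hD]; simp) hrest
    have hlen : (((PL ++ [l]).length : Nat) : Int) = (PL.length : Int) + 1 := by simp
    rw [hlen] at ihh
    rw [ihh]
    show _ = (((if l ≠ -1 then [(l, (PL.length : Int)), (N - 1 - r, (PL.length : Int))] else []) ++ refsL N ((PL.length : Int) + 1) (pvZip4 Ls Rs Us Ds)).all _ &&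
              ((if u ≠ -1 then [(u, (PL.length : Int)), (N - 1 - d, (PL.length : Int))] else []) ++ refsU N ((PL.length : Int) + 1) (pvZip4 Ls Rs Us Ds)).all _)
    rw [List.all_append, List.all_append]
    cases ((if l ≠ -1 then [(l, (PL.length : Int)), (N - 1 - r, (PL.length : Int))] else []).all fun p => pvOk N U D p.2 p.1) <;>
    cases ((if u ≠ -1 then [(u, (PL.length : Int)), (N - 1 - d, (PL.length : Int))] else []).all fun p => pvOk N L R p.2 p.1) <;>
    cases ((refsL N ((PL.length : Int) + 1) (pvZip4 Ls Rs Us Ds)).all fun p => pvOk N U D p.2 p.1) <;>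
    cases ((refsU N ((PL.length : Int) + 1) (pvZip4 Ls Rs Us Ds)).all fun p => pvOk N L R p.2 p.1) <;> rfl

-- ====== B side ======

theorem spanInv_empty : spanInv [] PySem.Dict.empty := by
  refine ⟨by simp [PySem.Dict.keys_empty], ?_, ?_⟩
  · intro c i h; simp at h
  · intro c lo hi h; rw [PySem.Dict.get?_empty] at h; cases h

theorem spanInv_add {P : List (Int × Int)} {d : PySem.Dict Int (Int × Int)}
    (h : spanInv P d) (c i : Int) : spanInv (P ++ [(c, i)]) (pvSpanAdd d c i) := by
  obtain ⟨hnd, hcon, hget⟩ := h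
  unfold pvSpanAdd
  refine ⟨PySem.Dict.nodup_keys_insert _ _ _ hnd, ?_, ?_⟩
  · intro c' i' hm
    rw [PySem.Dict.contains_insert]
    rcases List.mem_append.mp hm with hP | hlast
    · simp [hcon c' i' hP]
    · simp at hlast
      simp [hlast.1]
  · intro c' lo hi hg
    by_cases hc : c' = c
    · subst hc
      rw [PySem.Dict.get?_insert_self] at hg
      cases hg0 : d.get? c' with
      | none =>
        rw [hg0] at hg
        simp at hg
        have hcontr : ∀ j, (c', j) ∈ P → False := by
          intro j hj
          have := hcon c' j hj
          rw [(PySem.Dict.get?_eq_none_iff_contains _ _).mp hg0] at this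
          cases this
        refine ⟨?_, ?_, ?_⟩
        · exact List.mem_append.mpr (Or.inr (by simp [hg.1.symm]))
        · exact List.mem_append.mpr (Or.inr (by simp [hg.2.symm]))
        · intro j hj
          rcases List.mem_append.mp hj with hP | hlast
          · exact absurd hP (hcontr j)
          · simp at hlast; omega
      | some p0 =>
        obtain ⟨lo0, hi0⟩ := p0
        rw [hg0] at hg
        simp at hg
        obtain ⟨hm0, hm1, hb0⟩ := hget c' lo0 hi0 hg0
        refine ⟨?_, ?_, ?_⟩
        · rcases le_total lo0 i with hle | hle
          · rw [← hg.1, min_eq_left hle]; exact List.mem_append.mpr (Or.inl hm0)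
          · rw [← hg.1, min_eq_right hle]; exact List.mem_append.mpr (Or.inr (by simp))
        · rcases le_total hi0 i with hle | hle
          · rw [← hg.2, max_eq_right hle]; exact List.mem_append.mpr (Or.inr (by simp))
          · rw [← hg.2, max_eq_left hle]; exact List.mem_append.mpr (Or.inl hm1)
        · intro j hj
          rcases List.mem_append.mp hj with hP | hlast
          · have := hb0 j hP; omega
          · simp at hlast; omega
    · rw [PySem.Dict.get?_insert_of_ne _ _ hc] at hg
      obtain ⟨hm0, hm1, hb0⟩ := hget c' lo hi hg
      refine ⟨List.mem_append.mpr (Or.inl hm0), List.mem_append.mpr (Or.inl hm1), ?_⟩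
      intro j hj
      rcases List.mem_append.mp hj with hP | hlast
      · exact hb0 j hP
      · simp at hlast; exact absurd hlast.1 hc

theorem build_inv (N : Int) : ∀ (rows : List (Int × Int × Int × Int)) (s : Int)
    (cs rs : PySem.Dict Int (Int × Int)) (P1 P2 : List (Int × Int)),
    spanInv P1 cs → spanInv P2 rs →
    spanInv (P1 ++ refsL N s rows) (solveAltBuild N (PySem.List.enumerate rows s) cs rs).1 ∧
    spanInv (P2 ++ refsU N s rows) (solveAltBuild N (PySem.List.enumerate rows s) cs rs).2 := by
  intro rows
  induction rows with
  | nil =>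
    intro s cs rs P1 P2 h1 h2
    simp [PySem.List.enumerate_nil, solveAltBuild, refsL, refsU]
    exact ⟨h1, h2⟩
  | cons row rest ih =>
    intro s cs rs P1 P2 h1 h2
    obtain ⟨l, r, u, d⟩ := row
    rw [PySem.List.enumerate_cons]
    show spanInv (P1 ++ refsL N s ((l, r, u, d) :: rest))
        (solveAltBuild N ((s, (l, r, u, d)) :: PySem.List.enumerate rest (s + 1)) cs rs).1 ∧ _
    unfold solveAltBuild
    have step : ∀ (cs' rs' : PySem.Dict Int (Int × Int)),
        spanInv (P1 ++ (if l ≠ -1 then [(l, s), (N - 1 - r, s)] else [])) cs' →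
        spanInv (P2 ++ (if u ≠ -1 then [(u, s), (N - 1 - d, s)] else [])) rs' →
        spanInv (P1 ++ refsL N s ((l, r, u, d) :: rest)) (solveAltBuild N (PySem.List.enumerate rest (s + 1)) cs' rs').1 ∧
        spanInv (P2 ++ refsU N s ((l, r, u, d) :: rest)) (solveAltBuild N (PySem.List.enumerate rest (s + 1)) cs' rs').2 := by
      intro cs' rs' hc hr
      have := ih (s + 1) cs' rs' _ _ hc hr
      simpa [refsL, refsU, List.append_assoc] using this
    by_cases hl : l ≠ -1 <;> by_cases hu : u ≠ -1
    · simp only [if_pos hl, if_pos hu]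
      exact step _ _
        (by rw [if_pos hl]
            have := spanInv_add (spanInv_add h1 l s) (N - 1 - r) s
            simpa [List.append_assoc] using this)
        (by rw [if_pos hu]
            have := spanInv_add (spanInv_add h2 u s) (N - 1 - d) s
            simpa [List.append_assoc] using this)
    · simp only [if_pos hl, if_neg hu]
      exact step _ _
        (by rw [if_pos hl]
            have := spanInv_add (spanInv_add h1 l s) (N - 1 - r) s
            simpa [List.append_assoc] using this)
        (by rw [if_neg hu]; simpa using h2)
    · simp only [if_neg hl, if_pos hu]
      exact step _ _
        (by rw [if_neg hl]; simpa using h1)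
        (by rw [if_pos hu]
            have := spanInv_add (spanInv_add h2 u s) (N - 1 - d) s
            simpa [List.append_assoc] using this)
    · simp only [if_neg hl, if_neg hu]
      exact step _ _ (by rw [if_neg hl]; simpa using h1) (by rw [if_neg hu]; simpa using h2)

theorem checkSpan_iff (N : Int) (A B : List Int) (items : List (Int × (Int × Int))) :
    checkSpan N A B items = true ↔
    ∀ c lo hi, (c, (lo, hi)) ∈ items →
      ¬((PySem.List.pyGet? A c).getD 0 = -1 ∨ lo < (PySem.List.pyGet? A c).getD 0 ∨
        hi > N - 1 - (PySem.List.pyGet? B c).getD 0) := by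
  induction items with
  | nil => simp [checkSpan]
  | cons p rest ih =>
    obtain ⟨c0, lo0, hi0⟩ := p
    by_cases h : (PySem.List.pyGet? A c0).getD 0 = -1 ∨ lo0 < (PySem.List.pyGet? A c0).getD 0 ∨
        hi0 > N - 1 - (PySem.List.pyGet? B c0).getD 0
    · simp only [checkSpan, if_pos h]
      constructor
      · intro hc; cases hc
      · intro hall; exact absurd h (hall c0 lo0 hi0 (by simp))
    · simp only [checkSpan, if_neg h]
      rw [ih]
      constructor
      · intro hall c lo hi hm
        rcases List.mem_cons.mp hm with he | hm'
        · simp only [Prod.mk.injEq] at he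
          obtain ⟨rfl, rfl, rfl⟩ := he
          exact h
        · exact hall c lo hi hm'
      · intro hall c lo hi hm; exact hall c lo hi (List.mem_cons_of_mem _ hm)

-- with the invariant, the per-key span check equals the per-reference check
theorem spans_check (N : Int) (A B : List Int) (P : List (Int × Int))
    (d : PySem.Dict Int (Int × Int)) (hinv : spanInv P d) :
    (checkSpan N A B d.items = true) ↔ (∀ p ∈ P, pvOk N A B p.2 p.1 = true) := by
  obtain ⟨hnd, hcon, hget⟩ := hinv
  rw [checkSpan_iff]
  constructor
  · intro h p hm
    obtain ⟨c, i⟩ := p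
    have hc := hcon c i hm
    cases hg : d.get? c with
    | none =>
      rw [(PySem.Dict.get?_eq_none_iff_contains _ _).mp hg] at hc; cases hc
    | some p0 =>
      obtain ⟨lo, hi⟩ := p0
      have hitems := PySem.Dict.mem_items_of_get?_eq_some _ hg
      have hok := h c lo hi hitems
      obtain ⟨_, _, hb⟩ := hget c lo hi hg
      have hbi := hb i hm
      simp only [pvOk, decide_eq_true_eq]
      push_neg at hok
      exact ⟨hok.1, by omega, by omega⟩
  · intro h c lo hi hm
    have hg : d.get? c = some (lo, hi) := PySem.Dict.get?_of_mem_items _ hm hnd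
    obtain ⟨hmlo, hmhi, _⟩ := hget c lo hi hg
    have h1 := h (c, lo) hmlo
    have h2 := h (c, hi) hmhi
    simp only [pvOk, decide_eq_true_eq] at h1 h2
    push_neg
    exact ⟨h1.1, by omega, by omega⟩

-- ===== VERDICT (by name: the statement is the Claim_ definition above) =====
theorem solve_spec : Claim_equal_solve := by
  intro N L R U D _ _
  unfold Spec_solve solve solve_alt
  rw [solveLoop1_eq]
  by_cases h : solveAltPass1 N (pvZip4 L R U D) = true
  · rw [if_pos h, if_pos h]
    show solveLoop2 N L R U D ([] ++ blocksOf N 0 (pvZip4 L R U D)) = _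
    rw [List.nil_append]
    have hA := pass2_all N L R U D L R U D [] [] [] [] rfl rfl rfl rfl rfl rfl rfl h
    simp only [List.length_nil, Nat.cast_zero] at hA
    have hinv := build_inv N (pvZip4 L R U D) 0 PySem.Dict.empty PySem.Dict.empty [] []
      spanInv_empty spanInv_empty
    simp only [List.nil_append] at hinv
    have h1 := spans_check N U D _ _ hinv.1
    have h2 := spans_check N L R _ _ hinv.2
    rw [hA]
    have hrhs : (if checkSpan N U D (solveAltBuild N (PySem.List.enumerate (pvZip4 L R U D) 0) PySem.Dict.empty PySem.Dict.empty).1.items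
                 then checkSpan N L R (solveAltBuild N (PySem.List.enumerate (pvZip4 L R U D) 0) PySem.Dict.empty PySem.Dict.empty).2.items
                 else false)
        = (checkSpan N U D (solveAltBuild N (PySem.List.enumerate (pvZip4 L R U D) 0) PySem.Dict.empty PySem.Dict.empty).1.items &&
           checkSpan N L R (solveAltBuild N (PySem.List.enumerate (pvZip4 L R U D) 0) PySem.Dict.empty PySem.Dict.empty).2.items) := by
      cases checkSpan N U D (solveAltBuild N (PySem.List.enumerate (pvZip4 L R U D) 0) PySem.Dict.empty PySem.Dict.empty).1.items <;> simp
    rw [hrhs]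
    rw [Bool.eq_iff_iff]
    simp only [Bool.and_eq_true, List.all_eq_true]
    rw [h1, h2]
  · rw [if_neg h, if_neg h]
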